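-- pv_equiv track=rewrite | github.com/ahmednagra/Shah-House | May 24/AmaAssn Medical Scraper/amaassn_medical/amaassn_medical/spiders/amaassn.py | get_year_positions
-- ===== SOURCE A (Python) =====
-- def get_year_positions(item, thing):
--     thing = thing.get('field_program_size', [])
--
--     for i in range(6):
--         try:
--             item[f'Year {i + 1} Positions'] = thing[i]
--         except IndexError:
--             item[f'Year {i + 1} Positions'] = 0
--
--     return item
-- ===== SOURCE B (Python) =====
-- def get_year_positions(item, thing):
--     def fill(vals, k):
--         # recursively consume values head-by-head; k counts slots still to fill
--         if k == 0:
--             return item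
--         if vals:
--             item[f'Year {7 - k} Positions'] = vals[0]
--             return fill(vals[1:], k - 1)
--         item[f'Year {7 - k} Positions'] = 0
--         return fill(vals, k - 1)
--     return fill(thing.get('field_program_size', []), 6)
-- ===== Notes on version B (the rewrite author's own statement) =====
-- stated objective: alternative
-- what changed: Replaces A's fixed index loop with try/except-IndexError by a recursive function that consumes the value list head-by-head with a countdown of remaining slots, branching on list emptiness instead of catching exceptions and never indexing.
import Mathlib
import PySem

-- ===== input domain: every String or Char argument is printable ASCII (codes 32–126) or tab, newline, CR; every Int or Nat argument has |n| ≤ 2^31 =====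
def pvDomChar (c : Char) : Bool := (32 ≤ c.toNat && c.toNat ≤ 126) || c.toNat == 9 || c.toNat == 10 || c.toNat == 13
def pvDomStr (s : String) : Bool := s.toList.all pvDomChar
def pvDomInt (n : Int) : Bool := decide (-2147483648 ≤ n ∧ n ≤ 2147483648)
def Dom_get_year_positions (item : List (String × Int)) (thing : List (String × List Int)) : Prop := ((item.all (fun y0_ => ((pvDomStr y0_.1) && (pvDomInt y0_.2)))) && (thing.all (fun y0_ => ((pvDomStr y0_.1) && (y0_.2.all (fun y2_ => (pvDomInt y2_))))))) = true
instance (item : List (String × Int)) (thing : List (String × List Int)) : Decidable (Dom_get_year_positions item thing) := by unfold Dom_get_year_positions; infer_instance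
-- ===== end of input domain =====

-- B replaces A's fixed index loop with try/except-IndexError by a recursion that consumes
-- the value list head-by-head with a slot countdown (objective: alternative). Both Pythons
-- mutate `item` in place the same way; the equivalence proved is about the return value.

-- ===== PORT A =====
-- for i in range(6): item[key(i+1)] = thing[i] except IndexError -> 0  (pyGetD = index-or-default 0)
def get_year_positions (item : List (String × Int)) (thing : List (String × List Int)) : List (String × Int) :=
  let t := (PySem.Dict.mk thing).getD "field_program_size" []
  ((PySem.List.pyRange 0 6 1).foldl
    (fun d i => d.insert ("Year " ++ PySem.Int.toStr (i + 1) ++ " Positions") (PySem.List.pyGetD t i 0))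
    (PySem.Dict.mk item)).items

-- ===== PORT B =====
-- fill(vals, k): recursion on the countdown k, branching on vals being empty
def gypFill (d : PySem.Dict String Int) (vals : List Int) (k : Nat) : PySem.Dict String Int :=
  match k with
  | 0 => d
  | k' + 1 =>
    match vals with
    | v :: rest =>
        gypFill (d.insert ("Year " ++ PySem.Int.toStr (7 - ((k' : Int) + 1)) ++ " Positions") v) rest k'
    | [] =>
        gypFill (d.insert ("Year " ++ PySem.Int.toStr (7 - ((k' : Int) + 1)) ++ " Positions") 0) [] k'

def get_year_positions_alt (item : List (String × Int)) (thing : List (String × List Int)) : List (String × Int) :=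
  (gypFill (PySem.Dict.mk item) ((PySem.Dict.mk thing).getD "field_program_size" []) 6).items

-- ===== PRECONDITION & SPEC =====
def Spec_get_year_positions (item : List (String × Int)) (thing : List (String × List Int)) (out : List (String × Int)) : Prop := out = get_year_positions_alt item thing
instance (item : List (String × Int)) (thing : List (String × List Int)) (out : List (String × Int)) : Decidable (Spec_get_year_positions item thing out) := by unfold Spec_get_year_positions; infer_instance

-- ===== CLAIM (what is proved, stated in full; the proofs are below) =====
def Claim_equal_get_year_positions : Prop := ∀ (item : List (String × Int)) (thing : List (String × List Int)), Dom_get_year_positions item thing → Spec_get_year_positions item thing (get_year_positions item thing)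

-- ===== LEMMAS AND PROOFS =====

-- For any fixed value t of thing.get('field_program_size', []), A's six-step foldl and
-- B's recursion produce the same dict: case on t's shape relative to 6.
lemma gyp_core (item : List (String × Int)) (t : List Int) :
    ((PySem.List.pyRange 0 6 1).foldl
      (fun d i => d.insert ("Year " ++ PySem.Int.toStr (i + 1) ++ " Positions") (PySem.List.pyGetD t i 0))
      (PySem.Dict.mk item)).items
    = (gypFill (PySem.Dict.mk item) t 6).items := by
  rcases t with _ | ⟨a, _ | ⟨b, _ | ⟨c, _ | ⟨d, _ | ⟨e, _ | ⟨f, rest⟩⟩⟩⟩⟩⟩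
  case nil => rfl
  case cons.nil => rfl
  case cons.cons.nil => rfl
  case cons.cons.cons.nil => rfl
  case cons.cons.cons.cons.nil => rfl
  case cons.cons.cons.cons.cons.nil => rfl
  -- t has ≥ 6 elements: length of rest is unknown, reduce the indexed reads by lemmas
  have hr : PySem.List.pyRange 0 6 1 = [0,1,2,3,4,5] := by decide
  simp only [hr, List.foldl, gypFill]
  norm_num [PySem.List.pyGetD_of_nonneg, List.getD]
  simp

-- ===== VERDICT (by name: the statement is the Claim_ definition above) =====
theorem get_year_positions_spec : Claim_equal_get_year_positions := by
  intro item thing _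
  show get_year_positions item thing = get_year_positions_alt item thing
  unfold get_year_positions get_year_positions_alt
  exact gyp_core item _
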